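-- pv_equiv track=rewrite | github.com/ChethanVenkateshaiah/Python_assignment1 | word_abbreviation.py | get_letter_position
-- ===== SOURCE A (Python) =====
-- def get_letter_position(full_name, words, letter, index):
--     letter_position = full_name.find(letter, index)
--     cumulative_length = 0
--     for word in words:
--         if cumulative_length <= letter_position < cumulative_length + len(word):
--             position_in_word = letter_position - cumulative_length
--             is_last = position_in_word == len(word) - 1
--             return position_in_word, is_last
--         cumulative_length += len(word) + 1  # Including space
--     return 0, False
-- ===== SOURCE B (Python) =====
-- def get_letter_position(full_name, words, letter, index):
--     pos = full_name.find(letter, index)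
--     table = []
--     for w in words:
--         for j in range(len(w)):
--             table.append((j, j == len(w) - 1))
--         table.append((0, False))
--     if 0 <= pos < len(table):
--         return table[pos]
--     return 0, False
-- ===== Notes on version B (the rewrite author's own statement) =====
-- stated objective: alternative
-- what changed: B flattens the word list once into a per-character position table (offset, is_last, with a sentinel entry for each separating space) and answers by a single bounds-checked index into that table, instead of A's accumulating linear scan comparing the found position against each word's cumulative range.
import Mathlib
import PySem

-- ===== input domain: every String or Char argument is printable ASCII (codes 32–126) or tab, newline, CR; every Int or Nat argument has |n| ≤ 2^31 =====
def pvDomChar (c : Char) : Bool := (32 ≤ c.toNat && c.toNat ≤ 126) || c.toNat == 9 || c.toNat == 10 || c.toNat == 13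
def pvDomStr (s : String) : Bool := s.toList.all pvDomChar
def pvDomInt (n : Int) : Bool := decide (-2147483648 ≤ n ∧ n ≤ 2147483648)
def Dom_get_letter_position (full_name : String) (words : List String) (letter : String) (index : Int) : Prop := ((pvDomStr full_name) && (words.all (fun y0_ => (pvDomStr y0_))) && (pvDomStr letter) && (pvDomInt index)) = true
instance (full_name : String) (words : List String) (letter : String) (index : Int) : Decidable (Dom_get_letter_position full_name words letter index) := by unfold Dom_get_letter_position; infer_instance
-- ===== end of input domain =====

-- B replaces A's accumulating range scan by flattening the words once into a
-- per-character table (offset, is_last) with a sentinel entry per separating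
-- space, answered by one bounds-checked index (objective: alternative).

-- ===== PORT A =====
-- A's for-loop over words with cumulative_length, returning early on a hit.
def pyLoopA : List String → Int → Int → Int × Bool
  | [], _, _ => (0, false)
  | w :: ws, cum, lp =>
    if cum ≤ lp ∧ lp < cum + PySem.Str.len w then
      (lp - cum, decide (lp - cum = PySem.Str.len w - 1))
    else
      pyLoopA ws (cum + PySem.Str.len w + 1) lp

def get_letter_position (full_name : String) (words : List String) (letter : String) (index : Int) : Int × Bool :=
  pyLoopA words 0 (PySem.Str.findFrom full_name letter index none)

-- ===== PORT B =====
def get_letter_position_alt (full_name : String) (words : List String) (letter : String) (index : Int) : Int × Bool :=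
  let pos := PySem.Str.findFrom full_name letter index none
  let table : List (Int × Bool) := words.foldl (fun t w =>
    ((PySem.List.pyRange 0 (PySem.Str.len w) 1).foldl
      (fun t2 j => t2 ++ [(j, decide (j = PySem.Str.len w - 1))]) t) ++ [((0 : Int), false)]) []
  if 0 ≤ pos ∧ pos < (table.length : Int) then PySem.List.pyGetD table pos ((0 : Int), false)
  else (0, false)

-- ===== PRECONDITION & SPEC =====
def Spec_get_letter_position (full_name : String) (words : List String) (letter : String) (index : Int) (out : Int × Bool) : Prop := out = get_letter_position_alt full_name words letter index
instance (full_name : String) (words : List String) (letter : String) (index : Int) (out : Int × Bool) : Decidable (Spec_get_letter_position full_name words letter index out) := by unfold Spec_get_letter_position; infer_instance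

-- ===== CLAIM (what is proved, stated in full; the proofs are below) =====
def Claim_equal_get_letter_position : Prop := ∀ (full_name : String) (words : List String) (letter : String) (index : Int), Dom_get_letter_position full_name words letter index → Spec_get_letter_position full_name words letter index (get_letter_position full_name words letter index)

-- ===== LEMMAS AND PROOFS =====

-- one table block per word: its characters' entries, then the space sentinel
def pvBlock (w : String) : List (Int × Bool) :=
  ((PySem.List.pyRange 0 (PySem.Str.len w) 1).map (fun j => (j, decide (j = PySem.Str.len w - 1)))) ++ [((0 : Int), false)]

-- bounds-checked lookup, as B performs it
def pvLook (t : List (Int × Bool)) (i : Int) : Int × Bool :=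
  if 0 ≤ i ∧ i < (t.length : Int) then PySem.List.pyGetD t i ((0 : Int), false) else (0, false)

lemma pvBlock_eq (w : String) : pvBlock w =
    ((PySem.List.pyRange 0 (w.length : Int) 1).map
      (fun j => (j, decide (j = (w.length : Int) - 1)))) ++ [((0 : Int), false)] := by
  simp [pvBlock]

lemma pvBlock_length (w : String) : (pvBlock w).length = w.length + 1 := by
  simp [pvBlock, PySem.List.length_pyRange_one]

lemma pvLook_nil (i : Int) : pvLook [] i = (0, false) := by
  unfold pvLook
  rw [if_neg]
  simp

lemma pvLook_hit (w : String) (rest : List (Int × Bool)) (i : Int)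
    (h0 : 0 ≤ i) (h1 : i < (w.length : Int)) :
    pvLook (pvBlock w ++ rest) i = (i, decide (i = (w.length : Int) - 1)) := by
  have hi : i = ((i.toNat : Nat) : Int) := by omega
  have hlt : i.toNat < w.length := by omega
  rw [pvLook, if_pos, hi, PySem.List.pyGetD_natCast]
  · rw [List.getD_eq_getElem?_getD, List.getElem?_append_left, pvBlock_eq,
      List.getElem?_append_left]
    · rw [PySem.List.getElem?_map_pyRange_zero _ _ _ hlt]
      simp [← hi]
    · simpa [PySem.List.length_pyRange_one] using hlt
    · simp [pvBlock_length]; omega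
  · constructor
    · exact h0
    · simp [pvBlock_length]; omega

lemma pvLook_skip (w : String) (rest : List (Int × Bool)) (i : Int)
    (h : i < 0 ∨ (w.length : Int) ≤ i) :
    pvLook (pvBlock w ++ rest) i = pvLook rest (i - ((w.length : Int) + 1)) := by
  rcases h with h | h
  · rw [pvLook, pvLook, if_neg, if_neg] <;> omega
  · by_cases he : i = (w.length : Int)
    · subst he
      rw [pvLook, pvLook, if_pos, if_neg]
      · rw [PySem.List.pyGetD_natCast]
        rw [List.getD_eq_getElem?_getD, List.getElem?_append_left, pvBlock_eq,
          List.getElem?_append_right]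
        · simp [PySem.List.length_pyRange_one]
        · simp [PySem.List.length_pyRange_one]
        · simp [pvBlock_length]
      · omega
      · constructor
        · omega
        · simp [pvBlock_length]; omega
    · have hgt : (w.length : Int) < i := by omega
      have h0 : (0 : Int) ≤ i := by omega
      rw [pvLook, pvLook]
      by_cases hc : i - ((w.length : Int) + 1) < (rest.length : Int)
      · rw [if_pos, if_pos]
        · have hi : i = ((i.toNat : Nat) : Int) := by omega
          rw [hi]
          have hi' : ((i.toNat : Nat) : Int) - ((w.length : Int) + 1) =
              (((i.toNat - (w.length + 1) : Nat) : Nat) : Int) := by omega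
          rw [hi', PySem.List.pyGetD_natCast, PySem.List.pyGetD_natCast,
            List.getD_eq_getElem?_getD, List.getD_eq_getElem?_getD,
            List.getElem?_append_right]
          · rw [pvBlock_length]
          · rw [pvBlock_length]; omega
        · constructor
          · omega
          · exact hc
        · constructor
          · exact h0
          · simp [pvBlock_length]; omega
      · rw [if_neg, if_neg]
        · intro hx; exact hc (by simpa using hx.2)
        · intro hx
          have := hx.2
          simp [pvBlock_length] at this
          omega

-- A's scan over the remaining words equals B's lookup in the flattened table,
-- at the index shifted by the cumulative length already consumed.
lemma loopA_eq_look (ws : List String) (cum lp : Int) :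
    pyLoopA ws cum lp = pvLook (ws.flatMap pvBlock) (lp - cum) := by
  induction ws generalizing cum with
  | nil => simp [pyLoopA, pvLook_nil]
  | cons w ws ih =>
    rw [pyLoopA, List.flatMap_cons]
    by_cases h : cum ≤ lp ∧ lp < cum + PySem.Str.len w
    · rw [if_pos h]
      rw [pvLook_hit]
      · simp
      · simp [PySem.Str.len_eq] at h; omega
      · simp [PySem.Str.len_eq] at h; omega
    · rw [if_neg h, ih]
      rw [pvLook_skip]
      · congr 1
        simp [PySem.Str.len_eq]
        ring
      · simp [PySem.Str.len_eq] at h ⊢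
        omega

-- B's foldl-built table is the flattened per-word blocks
lemma tableB_eq_flatMap (ws : List String) :
    ws.foldl (fun t w =>
      ((PySem.List.pyRange 0 (PySem.Str.len w) 1).foldl
        (fun t2 j => t2 ++ [(j, decide (j = PySem.Str.len w - 1))]) t) ++ [((0 : Int), false)]) [] =
    ws.flatMap pvBlock := by
  have hf : (fun (t : List (Int × Bool)) (w : String) =>
      ((PySem.List.pyRange 0 (PySem.Str.len w) 1).foldl
        (fun t2 j => t2 ++ [(j, decide (j = PySem.Str.len w - 1))]) t) ++ [((0 : Int), false)]) =
      (fun t w => t ++ pvBlock w) := by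
    funext t w
    rw [PySem.List.foldl_append_singleton_eq_map, pvBlock, List.append_assoc]
  rw [hf]
  simpa using PySem.List.foldl_append_eq_flatMap pvBlock ws []

-- ===== VERDICT (by name: the statement is the Claim_ definition above) =====
theorem get_letter_position_spec : Claim_equal_get_letter_position := by
  intro full_name words letter index _
  unfold Spec_get_letter_position get_letter_position get_letter_position_alt
  rw [tableB_eq_flatMap, loopA_eq_look]
  simp [pvLook]
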